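-- pv_equiv track=rewrite | github.com/mar-file-system/GUFI | contrib/stats/process-per-level.py | pad_missing_levels
-- ===== SOURCE A (Python) =====
-- def pad_missing_levels(lhs, rhs):
--     # both stats should have the same number of columns
--     col_count = len(lhs[0])
--
--     # add missing upper levels
--     # not setting first column (level) because it won't be used
--     lhs_first_level = lhs[0][0]
--     lhs = [[0] * col_count for _ in range(lhs_first_level)] + lhs
--     rhs_first_level = rhs[0][0]
--     rhs = [[0] * col_count for _ in range(rhs_first_level)] + rhs
--
--     # fill missing lower levels with 0s
--     # not setting first column (level) because it won't be used
--     lhs_depth = len(lhs)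
--     rhs_depth = len(rhs)
--     if lhs_depth < rhs_depth:
--         lhs += [[0] * col_count] * (rhs_depth - lhs_depth)
--     elif lhs_depth > rhs_depth:
--         rhs += [[0] * col_count] * (lhs_depth - rhs_depth)
--
--     return lhs, rhs
-- ===== SOURCE B (Python) =====
-- def pad_missing_levels(lhs, rhs):
--     # Index-map construction: compute the aligned depth, then generate every
--     # output level directly - row i is the original row at i - top when i falls
--     # inside that side's window, and a zero row otherwise.
--     col_count = len(lhs[0])
--     lhs_top = max(lhs[0][0], 0)
--     rhs_top = max(rhs[0][0], 0)
--     total = max(lhs_top + len(lhs), rhs_top + len(rhs))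
--
--     def build(side, top):
--         return [side[i - top] if top <= i < top + len(side) else [0] * col_count
--                 for i in range(total)]
--
--     return build(lhs, lhs_top), build(rhs, rhs_top)
-- ===== Notes on version B (the rewrite author's own statement) =====
-- stated objective: alternative
-- what changed: B computes the aligned depth once and generates every output level by an index map over range(total) (original row at i - top inside the side's window, zero row elsewhere), instead of A's concatenation of a prepended zero block plus an if/elif appended zero block.
-- outside the precondition, e.g. on pad_missing_levels([], [[1]]): A raises IndexError, B raises IndexError; on pad_missing_levels([[]], [[1]]): A raises IndexError, B raises IndexError
import Mathlib
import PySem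

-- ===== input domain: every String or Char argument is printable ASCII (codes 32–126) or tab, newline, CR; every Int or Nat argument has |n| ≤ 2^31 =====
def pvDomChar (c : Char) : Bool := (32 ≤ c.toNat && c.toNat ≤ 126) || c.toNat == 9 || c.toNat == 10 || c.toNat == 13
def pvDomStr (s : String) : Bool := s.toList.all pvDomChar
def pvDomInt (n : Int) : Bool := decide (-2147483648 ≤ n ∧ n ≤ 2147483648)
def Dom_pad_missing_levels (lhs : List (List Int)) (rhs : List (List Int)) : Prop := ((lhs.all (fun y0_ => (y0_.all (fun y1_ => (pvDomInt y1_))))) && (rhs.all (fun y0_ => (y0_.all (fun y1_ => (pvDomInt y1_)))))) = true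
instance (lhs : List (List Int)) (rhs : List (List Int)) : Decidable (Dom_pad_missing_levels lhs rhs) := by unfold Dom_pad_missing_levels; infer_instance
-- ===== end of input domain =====

-- B generates every output level by an index map over the precomputed aligned depth
-- instead of A's concatenate-then-compare-lengths padding (objective: alternative).
-- Equivalence is about return values only (A's bottom padding aliases one shared row; values are equal).

-- ===== PORT A =====
def pad_missing_levels (lhs : List (List Int)) (rhs : List (List Int)) : List (List Int) × List (List Int) :=
  let col_count := (lhs.headD []).length
  -- [[0]*col_count for _ in range(n)]: range(n) is empty for n < 0, hence .toNat
  let lhs_first_level := ((lhs.headD []).headD 0).toNat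
  let lhs2 := List.replicate lhs_first_level (List.replicate col_count (0 : Int)) ++ lhs
  let rhs_first_level := ((rhs.headD []).headD 0).toNat
  let rhs2 := List.replicate rhs_first_level (List.replicate col_count (0 : Int)) ++ rhs
  let lhs_depth := lhs2.length
  let rhs_depth := rhs2.length
  if lhs_depth < rhs_depth then
    (lhs2 ++ List.replicate (rhs_depth - lhs_depth) (List.replicate col_count (0 : Int)), rhs2)
  else if rhs_depth < lhs_depth then
    (lhs2, rhs2 ++ List.replicate (lhs_depth - rhs_depth) (List.replicate col_count (0 : Int)))
  else (lhs2, rhs2)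

-- ===== PORT B =====
-- max(x, 0) then used as a range bound / index offset: .toNat is exact.
-- side[i - top] is only read when top ≤ i < top + len(side), so getD is exact there.
def pad_missing_levels_alt (lhs : List (List Int)) (rhs : List (List Int)) : List (List Int) × List (List Int) :=
  let col_count := (lhs.headD []).length
  let lhs_top := ((lhs.headD []).headD 0).toNat
  let rhs_top := ((rhs.headD []).headD 0).toNat
  let total := max (lhs_top + lhs.length) (rhs_top + rhs.length)
  let build := fun (side : List (List Int)) (top : Nat) =>
    (List.range total).map (fun i =>
      if top ≤ i ∧ i < top + side.length then side.getD (i - top) []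
      else List.replicate col_count (0 : Int))
  (build lhs lhs_top, build rhs rhs_top)

-- ===== PRECONDITION & SPEC =====
-- Pre_ excludes exactly the inputs where Python A raises IndexError: an empty
-- lhs or rhs (lhs[0] / rhs[0]) or an empty first row (lhs[0][0] / rhs[0][0]).
def Pre_pad_missing_levels (lhs : List (List Int)) (rhs : List (List Int)) : Prop :=
  lhs ≠ [] ∧ rhs ≠ [] ∧ lhs.headD [] ≠ [] ∧ rhs.headD [] ≠ []
instance (lhs : List (List Int)) (rhs : List (List Int)) : Decidable (Pre_pad_missing_levels lhs rhs) := by unfold Pre_pad_missing_levels; infer_instance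
def pvWitness_pad_missing_levels : List (List Int) × List (List Int) := ([[1, 5], [2, 6]], [[0, 7]])

def Spec_pad_missing_levels (lhs : List (List Int)) (rhs : List (List Int)) (out : List (List Int) × List (List Int)) : Prop := out = pad_missing_levels_alt lhs rhs
instance (lhs : List (List Int)) (rhs : List (List Int)) (out : List (List Int) × List (List Int)) : Decidable (Spec_pad_missing_levels lhs rhs out) := by unfold Spec_pad_missing_levels; infer_instance

-- ===== CLAIM (what is proved, stated in full; the proofs are below) =====
def Claim_equal_pad_missing_levels : Prop := ∀ (lhs : List (List Int)) (rhs : List (List Int)), Dom_pad_missing_levels lhs rhs → Pre_pad_missing_levels lhs rhs → Spec_pad_missing_levels lhs rhs (pad_missing_levels lhs rhs)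

-- ===== LEMMAS AND PROOFS =====
-- The index-map over range (top + len + b) equals the three-segment concatenation.
theorem build_eq (side : List (List Int)) (z : List Int) (top b : Nat) :
    (List.range (top + side.length + b)).map (fun i =>
      if top ≤ i ∧ i < top + side.length then side.getD (i - top) [] else z)
    = List.replicate top z ++ side ++ List.replicate b z := by
  apply List.ext_getElem
  · simp; omega
  · intro i h1 h2
    simp only [List.getElem_map, List.getElem_range]
    by_cases hi1 : i < top
    · rw [List.getElem_append_left (by simp; omega), List.getElem_append_left (by simpa using hi1)]
      rw [if_neg (by omega), List.getElem_replicate]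
    · by_cases hi2 : i < top + side.length
      · rw [List.getElem_append_left (by simp; omega), List.getElem_append_right (by simp; omega)]
        simp only [List.length_replicate]
        rw [if_pos ⟨by omega, hi2⟩, List.getD_eq_getElem _ _ (by omega)]
      · rw [List.getElem_append_right (by simp; omega)]
        simp only [List.length_append, List.length_replicate]
        rw [if_neg (by omega), List.getElem_replicate]

theorem pad_eq (lhs rhs : List (List Int)) :
    pad_missing_levels lhs rhs = pad_missing_levels_alt lhs rhs := by
  unfold pad_missing_levels pad_missing_levels_alt
  simp only [List.length_append, List.length_replicate]
  set c := (lhs.headD []).length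
  set lt := ((lhs.headD []).headD 0).toNat
  set rt := ((rhs.headD []).headD 0).toNat
  set z : List Int := List.replicate c 0
  have hb : ∀ (side : List (List Int)) (top bl : Nat), top + side.length + bl = max (lt + lhs.length) (rt + rhs.length) →
      (List.range (max (lt + lhs.length) (rt + rhs.length))).map (fun i =>
        if top ≤ i ∧ i < top + side.length then side.getD (i - top) [] else z)
      = List.replicate top z ++ side ++ List.replicate bl z := by
    intro side top bl h
    rw [← h, build_eq]
  split_ifs with h1 h2
  · rw [hb lhs lt (rt + rhs.length - (lt + lhs.length)) (by omega), hb rhs rt 0 (by omega)]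
    simp
  · rw [hb lhs lt 0 (by omega), hb rhs rt (lt + lhs.length - (rt + rhs.length)) (by omega)]
    simp
  · rw [hb lhs lt 0 (by omega), hb rhs rt 0 (by omega)]
    simp

-- ===== VERDICT (by name: the statement is the Claim_ definition above) =====
theorem pad_missing_levels_spec : Claim_equal_pad_missing_levels := by
  intro lhs rhs _ _
  exact pad_eq lhs rhs
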